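-- pv_equiv track=rewrite | github.com/CodingWeeb-Gaurav/skeletons | responsesAPIchatbot.py | get_recent_messages_with_current
-- ===== SOURCE A (Python) =====
-- from typing import Dict, List, Optional, Any
--
-- CONTEXT_PAIRS_LIMIT = 6  # Create new session every N message pairs
--
-- def get_recent_messages_with_current(chat_history: List[Dict], current_user_message: str, current_ai_response: str) -> List[Dict]:
--     """Get recent messages for context reset"""
--     if not chat_history:
--         return []
--
--     conversation_messages = [
--         msg for msg in chat_history
--         if msg.get("role") in ["user", "assistant"]
--     ]
--
--     # Get last N conversation pairs (excluding current)
--     recent_conversation = conversation_messages[-(2 * (CONTEXT_PAIRS_LIMIT - 1)):]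
--
--     # Add current conversation
--     messages_with_current = [
--         *recent_conversation,
--         {"role": "user", "message": current_user_message},
--         {"role": "assistant", "message": current_ai_response}
--     ]
--
--     return messages_with_current
-- ===== SOURCE B (Python) =====
-- CONTEXT_PAIRS_LIMIT = 6  # Create new session every N message pairs
--
-- def get_recent_messages_with_current(chat_history, current_user_message, current_ai_response):
--     """Reverse scan with a bounded tail buffer instead of full filter + negative slice."""
--     if not chat_history:
--         return []
--     limit = 2 * (CONTEXT_PAIRS_LIMIT - 1)
--     buf = []
--     for msg in reversed(chat_history):
--         if len(buf) == limit:
--             break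
--         if msg.get("role") in ("user", "assistant"):
--             buf.append(msg)
--     buf.reverse()
--     buf.append({"role": "user", "message": current_user_message})
--     buf.append({"role": "assistant", "message": current_ai_response})
--     return buf
-- ===== Notes on version B (the rewrite author's own statement) =====
-- stated objective: alternative
-- what changed: Replaced the full forward filter plus negative-index slice with a single reverse scan that appends matching messages into a bounded tail buffer and stops once it holds 2*(CONTEXT_PAIRS_LIMIT-1) items, then reverses the buffer and appends the two current messages.
import Mathlib
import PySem

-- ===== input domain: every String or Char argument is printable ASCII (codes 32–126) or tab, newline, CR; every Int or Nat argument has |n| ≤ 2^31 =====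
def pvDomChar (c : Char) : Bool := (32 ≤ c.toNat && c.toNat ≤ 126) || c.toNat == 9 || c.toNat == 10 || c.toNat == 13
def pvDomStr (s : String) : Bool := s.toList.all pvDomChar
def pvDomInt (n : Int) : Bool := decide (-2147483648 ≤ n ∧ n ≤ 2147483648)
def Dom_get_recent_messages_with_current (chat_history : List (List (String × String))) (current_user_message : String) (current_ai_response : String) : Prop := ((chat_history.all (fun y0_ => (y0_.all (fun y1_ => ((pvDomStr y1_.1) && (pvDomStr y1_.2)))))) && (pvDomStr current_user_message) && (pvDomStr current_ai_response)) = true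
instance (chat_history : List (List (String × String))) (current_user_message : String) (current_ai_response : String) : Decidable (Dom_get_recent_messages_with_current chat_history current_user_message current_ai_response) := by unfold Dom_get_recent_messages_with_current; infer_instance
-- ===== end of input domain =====

-- B replaces A's full forward filter + negative slice by a single reverse scan with a
-- bounded tail buffer (objective: alternative decomposition, stops early on long histories).

-- ===== PORT A =====
-- msg.get("role") on an association list: first match
def pvIsConv (msg : List (String × String)) : Bool :=
  List.lookup "role" msg == some "user" || List.lookup "role" msg == some "assistant"

def get_recent_messages_with_current (chat_history : List (List (String × String))) (current_user_message : String) (current_ai_response : String) : List (List (String × String)) :=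
  if chat_history = [] then []
  else
    let conversation_messages := chat_history.filter (fun msg => pvIsConv msg)
    let recent_conversation := PySem.List.slice conversation_messages (some (-(2 * (6 - 1) : Int))) none
    recent_conversation ++
      [[("role", "user"), ("message", current_user_message)],
       [("role", "assistant"), ("message", current_ai_response)]]

-- ===== PORT B =====
-- the reverse-scan loop of Source B: walk the reversed history, append matches until the buffer is full
def pvCollect (limit : Nat) : List (List (String × String)) → List (List (String × String)) → List (List (String × String))
  | [], buf => buf
  | msg :: rest, buf =>
    if buf.length = limit then buf
    else if pvIsConv msg then pvCollect limit rest (buf ++ [msg])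
    else pvCollect limit rest buf

def get_recent_messages_with_current_alt (chat_history : List (List (String × String))) (current_user_message : String) (current_ai_response : String) : List (List (String × String)) :=
  if chat_history = [] then []
  else
    let limit := 2 * (6 - 1)
    let buf := pvCollect limit chat_history.reverse []
    buf.reverse ++
      [[("role", "user"), ("message", current_user_message)],
       [("role", "assistant"), ("message", current_ai_response)]]

-- ===== PRECONDITION & SPEC =====
def Spec_get_recent_messages_with_current (chat_history : List (List (String × String))) (current_user_message : String) (current_ai_response : String) (out : List (List (String × String))) : Prop := out = get_recent_messages_with_current_alt chat_history current_user_message current_ai_response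
instance (chat_history : List (List (String × String))) (current_user_message : String) (current_ai_response : String) (out : List (List (String × String))) : Decidable (Spec_get_recent_messages_with_current chat_history current_user_message current_ai_response out) := by unfold Spec_get_recent_messages_with_current; infer_instance

-- ===== CLAIM (what is proved, stated in full; the proofs are below) =====
def Claim_equal_get_recent_messages_with_current : Prop := ∀ (chat_history : List (List (String × String))) (current_user_message : String) (current_ai_response : String), Dom_get_recent_messages_with_current chat_history current_user_message current_ai_response → Spec_get_recent_messages_with_current chat_history current_user_message current_ai_response (get_recent_messages_with_current chat_history current_user_message current_ai_response)

-- ===== LEMMAS AND PROOFS =====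
lemma pvCollect_eq (limit : Nat) (l buf : List (List (String × String))) (h : buf.length ≤ limit) :
    pvCollect limit l buf = buf ++ (l.filter (fun msg => pvIsConv msg)).take (limit - buf.length) := by
  induction l generalizing buf with
  | nil => simp [pvCollect]
  | cons m rest ih =>
    by_cases hf : buf.length = limit
    · simp [pvCollect, hf]
    · have hlt : buf.length < limit := lt_of_le_of_ne h hf
      by_cases hp : pvIsConv m
      · rw [pvCollect, if_neg hf, if_pos hp, ih (buf ++ [m]) (by simp; omega)]
        simp [hp]
        rw [List.take_cons (by omega)]
        simp
        omega
      · rw [pvCollect, if_neg hf, if_neg hp, ih buf h]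
        simp [hp]

lemma reverse_take_reverse (xs : List (List (String × String))) (n : Nat) :
    (xs.reverse.take n).reverse = xs.drop (xs.length - n) := by
  rw [List.take_reverse]
  simp

-- ===== VERDICT (by name: the statement is the Claim_ definition above) =====
theorem get_recent_messages_with_current_spec : Claim_equal_get_recent_messages_with_current := by
  intro ch cum car _
  unfold Spec_get_recent_messages_with_current get_recent_messages_with_current get_recent_messages_with_current_alt
  by_cases hch : ch = []
  · simp [hch]
  · simp only [if_neg hch]
    rw [pvCollect_eq 10 ch.reverse [] (by simp)]
    simp only [List.nil_append, List.length_nil, Nat.sub_zero]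
    rw [List.filter_reverse, reverse_take_reverse]
    congr 1
    have : (-(2 * (6 - 1) : Int)) = -(10 : Int) := by norm_num
    rw [this, PySem.List.slice_from_neg_ofNat _ 10 (by omega)]
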